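-- pv_equiv track=rewrite | github.com/tibocin/digi-infrastructure | pcs/src/pcs/repositories/postgres_repo.py | _group_updates_by_fields
-- ===== SOURCE A (Python) =====
-- from typing import Any, Dict, List, Optional, Type, Tuple
--
-- def _group_updates_by_fields(updates: List[Dict[str, Any]]) -> Dict[Tuple[str, ...], List[Dict[str, Any]]]:
--     """Group updates by the set of fields being updated for query optimization."""
--     groups = {}
--
--     for update_data in updates:
--         # Create a sorted tuple of field names (excluding 'id')
--         fields = tuple(sorted(k for k in update_data.keys() if k != 'id'))
--
--         if fields not in groups:
--             groups[fields] = []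
--         groups[fields].append(update_data)
--
--     return groups
-- ===== SOURCE B (Python) =====
-- from typing import Any, Dict, List, Tuple
--
-- def _group_updates_by_fields(updates: List[Dict[str, Any]]) -> Dict[Tuple[str, ...], List[Dict[str, Any]]]:
--     """Group updates by the set of fields being updated for query optimization."""
--     def key(u):
--         return tuple(sorted(k for k in u.keys() if k != 'id'))
--
--     distinct_keys = list(dict.fromkeys(key(u) for u in updates))
--     return {k: [u for u in updates if key(u) == k] for k in distinct_keys}
-- ===== Notes on version B (the rewrite author's own statement) =====
-- stated objective: alternative
-- what changed: Replaces the single-pass dict accumulation (membership test + in-place append) with a two-phase pipeline: first dedupe the field-name keys in first-occurrence order via dict.fromkeys, then build each group as a filter of the whole list in one comprehension.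
import Mathlib
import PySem

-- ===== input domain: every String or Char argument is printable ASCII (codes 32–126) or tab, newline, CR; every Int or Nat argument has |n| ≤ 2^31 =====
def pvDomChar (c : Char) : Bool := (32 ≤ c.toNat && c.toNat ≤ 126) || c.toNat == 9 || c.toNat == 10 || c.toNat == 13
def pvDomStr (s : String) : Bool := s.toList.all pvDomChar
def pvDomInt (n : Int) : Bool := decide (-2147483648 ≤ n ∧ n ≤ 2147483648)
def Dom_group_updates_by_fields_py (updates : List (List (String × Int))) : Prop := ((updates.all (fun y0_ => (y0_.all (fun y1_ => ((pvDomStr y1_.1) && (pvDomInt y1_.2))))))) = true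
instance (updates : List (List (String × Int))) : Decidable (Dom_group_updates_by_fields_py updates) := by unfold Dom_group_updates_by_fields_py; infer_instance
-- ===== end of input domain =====

-- B replaces A's single-pass dict accumulation by a two-phase pipeline (dedupe the keys, then one filter per key); alternative decomposition, not faster.


-- ===== PORT A =====
-- tuple(sorted(k for k in update_data.keys() if k != 'id')): the dict's keys are the
-- distinct first-occurrence keys of the association list (PySem.List.dedup), sorted without a key.
-- Both Pythons compute the group key with this identical expression, so the helper is shared.
def pvFields (u : List (String × Int)) : List String :=
  PySem.List.sorted ((PySem.List.dedup (u.map Prod.fst)).filter (fun k => k ≠ "id")) (fun x => x) false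

def group_updates_by_fields_py (updates : List (List (String × Int))) : List (List String × List (List (String × Int))) :=
  (updates.foldl
    (fun groups update_data =>
      let fields := pvFields update_data
      -- if fields not in groups: groups[fields] = []
      let groups := if groups.contains fields then groups else groups.insert fields []
      -- groups[fields].append(update_data)  (lookup cannot fail here; modify with default [] is exact)
      groups.modify fields [] (fun l => l ++ [update_data]))
    PySem.Dict.empty).items

-- ===== PORT B =====
def group_updates_by_fields_py_alt (updates : List (List (String × Int))) : List (List String × List (List (String × Int))) :=
  let distinct_keys := PySem.List.dedup (updates.map pvFields)   -- list(dict.fromkeys(...))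
  distinct_keys.map (fun k => (k, updates.filter (fun u => pvFields u == k)))

-- ===== PRECONDITION & SPEC =====
def Spec_group_updates_by_fields_py (updates : List (List (String × Int))) (out : List (List String × List (List (String × Int)))) : Prop := out = group_updates_by_fields_py_alt updates
instance (updates : List (List (String × Int))) (out : List (List String × List (List (String × Int)))) : Decidable (Spec_group_updates_by_fields_py updates out) := by unfold Spec_group_updates_by_fields_py; infer_instance

-- ===== CLAIM (what is proved, stated in full; the proofs are below) =====
def Claim_equal_group_updates_by_fields_py : Prop := ∀ (updates : List (List (String × Int))), Dom_group_updates_by_fields_py updates → Spec_group_updates_by_fields_py updates (group_updates_by_fields_py updates)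

-- ===== LEMMAS AND PROOFS =====

-- A's loop body (ensure key present, then append) is one dict "modify" step.
theorem pvStep_eq (d : PySem.Dict (List String) (List (List (String × Int)))) (u : List (String × Int)) :
    (let fields := pvFields u
     let g := if d.contains fields then d else d.insert fields []
     g.modify fields [] (fun l => l ++ [u]))
    = d.modify (pvFields u) [] (fun l => l ++ [u]) := by
  by_cases h : d.contains (pvFields u)
  · simp [h]
  · simp only [h, Bool.false_eq_true, if_false]
    simp [PySem.Dict.modify, PySem.Dict.getD_insert_self, PySem.Dict.insert_insert_self,
      PySem.Dict.getD_of_not_contains d ([] : List (List (String × Int))) (by simpa using h)]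

theorem pvItems_char (updates : List (List (String × Int))) :
    (updates.foldl (fun d u => d.modify (pvFields u) [] (fun l => l ++ [u]))
        PySem.Dict.empty).items
    = (PySem.List.dedup (updates.map pvFields)).map
        (fun k => (k, updates.filter (fun u => pvFields u == k))) := by
  set D := updates.foldl (fun d u => d.modify (pvFields u) [] (fun l => l ++ [u])) PySem.Dict.empty with hD
  have hnd : D.keys.Nodup := by
    rw [hD]
    exact PySem.Dict.nodup_keys_foldl_modify_key updates pvFields [] (fun _ u l => l ++ [u]) _
      PySem.Dict.nodup_keys_empty
  have hk : D.keys = PySem.List.dedup (updates.map pvFields) := by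
    rw [hD, PySem.Dict.keys_foldl_modify_key updates pvFields [] (fun _ u l => l ++ [u])]
    simp [PySem.Dict.keys_empty, PySem.Set.update, PySem.Set.ofList, PySem.Set.empty,
      PySem.List.dedup_eq_ofList]
  have hg : ∀ k, D.getD k [] = updates.filter (fun u => pvFields u == k) := by
    intro k
    have hmap : updates.foldl (fun d u => d.modify (pvFields u) [] (fun l => l ++ [u]))
        PySem.Dict.empty
        = (updates.map (fun u => (pvFields u, u))).foldl
            (fun d p => d.modify p.1 [] (fun l => l ++ [p.2])) PySem.Dict.empty := by
      rw [List.foldl_map]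
    rw [hD, hmap, PySem.Dict.getD_foldl_modify_append]
    simp [PySem.Dict.getD_empty, List.filter_map, Function.comp_def]
  rw [PySem.Dict.items_eq_map_keys D hnd [], hk]
  exact List.map_congr_left (fun k _ => by rw [hg k])

-- ===== VERDICT (by name: the statement is the Claim_ definition above) =====
theorem group_updates_by_fields_py_spec : Claim_equal_group_updates_by_fields_py := by
  intro updates _
  unfold Spec_group_updates_by_fields_py group_updates_by_fields_py group_updates_by_fields_py_alt
  have hfold : updates.foldl
      (fun groups update_data =>
        let fields := pvFields update_data
        let groups := if groups.contains fields then groups else groups.insert fields []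
        groups.modify fields [] (fun l => l ++ [update_data]))
      PySem.Dict.empty
      = updates.foldl (fun d u => d.modify (pvFields u) [] (fun l => l ++ [u]))
          PySem.Dict.empty := by
    congr 1
    funext d u
    exact pvStep_eq d u
  rw [hfold, pvItems_char]
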